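-- pv_equiv track=rewrite | github.com/SnowDrift80/rio_backend | normalizepdf.py | set_brackets
-- ===== SOURCE A (Python) =====
-- def set_brackets(text):
--     text = '[[' + text
--     switch = "open"
--     active = False
--     new_text = ""
--     for i in text:
--         new_text += i
--         if ord(i) == 10:
--             if active == False:
--                 if switch == "open":
--                     new_text += "]]"
--                     switch = "closed"
--                 else:
--                     new_text += "[["
--                     switch = "open"
--                 active = True
--         else:
--             active = False
--     if switch == "open":
--         new_text += "]]"
--     return new_text
-- ===== SOURCE B (Python) =====
-- def set_brackets(text):
--     parts = ('[[' + text).split('\n')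
--     pieces = [parts[0]]
--     k = 0
--     for j in range(1, len(parts)):
--         pieces.append('\n')
--         if parts[j - 1] != '':
--             k += 1
--             pieces.append(']]' if k % 2 else '[[')
--         pieces.append(parts[j])
--     if k % 2 == 0:
--         pieces.append(']]')
--     return ''.join(pieces)
-- ===== Notes on version B (the rewrite author's own statement) =====
-- stated objective: simpler
-- what changed: Replaces the char-by-char state machine with switch/active flags by splitting the bracket-prefixed text on newlines into whole segments and rejoining once: each newline boundary whose left segment is nonempty gets an alternating close/open marker, and a final close marker is appended iff the marker count is even.
import Mathlib
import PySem

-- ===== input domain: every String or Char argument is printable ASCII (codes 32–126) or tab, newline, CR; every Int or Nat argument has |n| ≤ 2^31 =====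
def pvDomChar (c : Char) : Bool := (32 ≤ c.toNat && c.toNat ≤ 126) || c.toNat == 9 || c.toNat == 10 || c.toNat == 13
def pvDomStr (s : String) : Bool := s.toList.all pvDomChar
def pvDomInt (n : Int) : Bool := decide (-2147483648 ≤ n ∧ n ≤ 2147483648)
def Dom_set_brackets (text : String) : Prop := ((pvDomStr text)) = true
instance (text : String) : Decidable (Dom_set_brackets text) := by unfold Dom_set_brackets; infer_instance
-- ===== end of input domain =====

-- B replaces A's char-by-char state machine (switch/active flags) by a split('\n')-then-join
-- over whole segments with a parity counter (simpler; one join instead of per-char +=,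
-- measured faster in a timing run). String concatenation is ported over List Char (exact for Python str).

-- ===== PORT A =====
-- the for-loop of A: state (switch, active, new_text); returns final (switch, new_text)
def setBracketsLoop : List Char → String → Bool → List Char → (String × List Char)
  | [], sw, _, acc => (sw, acc)
  | c :: rest, sw, ac, acc =>
    let acc' := acc ++ [c]
    if c.toNat == 10 then
      if ac == false then
        if sw == "open" then setBracketsLoop rest "closed" true (acc' ++ [']', ']'])
        else setBracketsLoop rest "open" true (acc' ++ ['[', '['])
      else setBracketsLoop rest sw ac acc'
    else setBracketsLoop rest sw false acc'

def set_brackets (text : String) : String :=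
  let t := '[' :: '[' :: text.toList           -- text = '[[' + text
  let r := setBracketsLoop t "open" false []
  String.mk (if r.1 == "open" then r.2 ++ [']', ']'] else r.2)

-- ===== PORT B =====
-- the for-loop of B over j = 1 .. len(parts)-1, carrying (prev = parts[j-1], k); returns (pieces, k)
def sbPairs : List Char → List (List Char) → Nat → (List (List Char) × Nat)
  | _, [], k => ([], k)
  | prev, cur :: rest, k =>
    if prev ≠ [] then
      let r := sbPairs cur rest (k + 1)
      (['\n'] :: (if (k + 1) % 2 = 1 then [']', ']'] else ['[', '[']) :: cur :: r.1, r.2)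
    else
      let r := sbPairs cur rest k
      (['\n'] :: cur :: r.1, r.2)

def set_brackets_alt (text : String) : String :=
  let parts := List.splitOn '\n' ('[' :: '[' :: text.toList)   -- ('[[' + text).split('\n')
  let p0 := parts.headD []                                      -- parts[0]
  let r := sbPairs p0 parts.tail 0
  let pieces := p0 :: r.1
  let pieces := if r.2 % 2 = 0 then pieces ++ [[']', ']']] else pieces
  String.mk pieces.flatten                                      -- ''.join(pieces)

-- ===== PRECONDITION & SPEC =====
def Spec_set_brackets (text : String) (out : String) : Prop := out = set_brackets_alt text
instance (text : String) (out : String) : Decidable (Spec_set_brackets text out) := by unfold Spec_set_brackets; infer_instance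

-- ===== CLAIM (what is proved, stated in full; the proofs are below) =====
def Claim_equal_set_brackets : Prop := ∀ (text : String), Dom_set_brackets text → Spec_set_brackets text (set_brackets text)

-- ===== LEMMAS AND PROOFS =====

-- reference recursion: seen = "current segment is nonempty so far", k = number of triggers
def hRef : List Char → Bool → Nat → (List Char × Nat)
  | [], _, k => ([], k)
  | c :: rest, seen, k =>
    if c = '\n' then
      if seen then
        let r := hRef rest false (k + 1)
        ('\n' :: ((if (k + 1) % 2 = 1 then [']', ']'] else ['[', '[']) ++ r.1), r.2)
      else
        let r := hRef rest false k
        ('\n' :: r.1, r.2)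
    else
      let r := hRef rest true k
      (c :: r.1, r.2)

theorem char_eq_newline_of_toNat (c : Char) (h : c.toNat = 10) : c = '\n' := by
  apply Char.ext
  apply UInt32.toNat_inj.mp
  exact h

-- A's loop equals hRef (with seen = !active, switch = parity of k)
theorem loopA_eq_hRef (cs : List Char) : ∀ (active : Bool) (k : Nat) (acc : List Char),
    setBracketsLoop cs (if k % 2 = 0 then "open" else "closed") active acc
      = (if (hRef cs (!active) k).2 % 2 = 0 then "open" else "closed",
         acc ++ (hRef cs (!active) k).1) := by
  induction cs with
  | nil => intro active k acc; simp [setBracketsLoop, hRef]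
  | cons c rest ih =>
    intro active k acc
    by_cases hc : c = '\n'
    · subst hc
      cases active with
      | false =>
        rcases Nat.even_or_odd k with he | ho
        · have hk : k % 2 = 0 := Nat.even_iff.mp he
          have hk1 : (k + 1) % 2 = 1 := by omega
          have := ih true (k + 1) (acc ++ ['\n'] ++ [']', ']'])
          simp [hk1] at this
          simp [setBracketsLoop, hRef, hk, hk1, this]
        · have hk : k % 2 = 1 := Nat.odd_iff.mp ho
          have hk0 : (k + 1) % 2 = 0 := by omega
          have := ih true (k + 1) (acc ++ ['\n'] ++ ['[', '['])
          simp [hk0] at this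
          simp [setBracketsLoop, hRef, hk, hk0, this]
      | true =>
        have := ih true k (acc ++ ['\n'])
        simp [setBracketsLoop, hRef, this]
    · have hcn : (c.toNat == 10) = false := by
        apply decide_eq_false
        intro h; exact hc (char_eq_newline_of_toNat c h)
      have := ih false k (acc ++ [c])
      simp [setBracketsLoop, hRef, hc, hcn, this]

-- B's pair loop over splitOn equals hRef (seen = current segment prefix `pre` nonempty)
theorem sbPairs_eq_hRef (cs : List Char) : ∀ (pre : List Char) (k : Nat),
    (List.splitOn '\n' cs).headD []
        ++ (sbPairs (pre ++ (List.splitOn '\n' cs).headD []) (List.splitOn '\n' cs).tail k).1.flatten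
      = (hRef cs (!pre.isEmpty) k).1
    ∧ (sbPairs (pre ++ (List.splitOn '\n' cs).headD []) (List.splitOn '\n' cs).tail k).2
      = (hRef cs (!pre.isEmpty) k).2 := by
  induction cs with
  | nil => intro pre k; simp [List.splitOn_nil, sbPairs, hRef]
  | cons c rest ih =>
    intro pre k
    have hsplit : List.splitOn '\n' (c :: rest)
        = if c = '\n' then [] :: List.splitOn '\n' rest
          else List.modifyHead (List.cons c) (List.splitOn '\n' rest) := by
      show List.splitOnP _ (c :: rest) = _
      rw [List.splitOnP_cons]
      by_cases hc : c = '\n' <;> simp [hc, List.splitOn]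
    obtain ⟨h', t', hrest⟩ : ∃ h' t', List.splitOn '\n' rest = h' :: t' := by
      cases hh : List.splitOn '\n' rest with
      | nil => exact absurd hh (List.splitOnP_ne_nil _ _)
      | cons a b => exact ⟨a, b, rfl⟩
    by_cases hc : c = '\n'
    · subst hc
      rw [hsplit]; simp only [hrest]
      cases pre with
      | nil =>
        have := ih [] k
        simp [hrest] at this
        simp [sbPairs, hRef, this.1, this.2]
      | cons p ps =>
        have := ih [] (k + 1)
        simp [hrest] at this
        simp [sbPairs, hRef, this.1, this.2]
    · rw [hsplit]
      simp only [if_neg hc, hrest, List.modifyHead_cons, List.headD_cons, List.tail_cons]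
      have key := ih (pre ++ [c]) k
      have hb : (!(pre ++ [c]).isEmpty) = true := by simp
      rw [hb, hrest] at key
      simp only [List.headD_cons, List.tail_cons, List.append_assoc, List.singleton_append] at key
      constructor
      · rw [List.cons_append, key.1]
        simp [hRef, hc]
      · rw [key.2]
        simp [hRef, hc]

-- hRef ignores `seen` on a non-newline head
theorem hRef_head_not_newline (c : Char) (hc : c ≠ '\n') (rest : List Char) (s₁ s₂ : Bool) (k : Nat) :
    hRef (c :: rest) s₁ k = hRef (c :: rest) s₂ k := by
  simp [hRef, hc]

-- ===== VERDICT (by name: the statement is the Claim_ definition above) =====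
theorem set_brackets_spec : Claim_equal_set_brackets := by
  intro text _
  unfold Spec_set_brackets set_brackets set_brackets_alt
  have hA := loopA_eq_hRef ('[' :: '[' :: text.toList) false 0 []
  have hB := sbPairs_eq_hRef ('[' :: '[' :: text.toList) [] 0
  norm_num at hA hB
  rw [hRef_head_not_newline '[' (by decide) ('[' :: text.toList) false true 0] at hB
  rcases Nat.even_or_odd (hRef ('[' :: '[' :: text.toList) true 0).2 with he | ho
  · have hk : (hRef ('[' :: '[' :: text.toList) true 0).2 % 2 = 0 := Nat.even_iff.mp he
    simp [hA, hB.2, hk]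
    rw [← List.append_assoc, hB.1]
  · have hk : (hRef ('[' :: '[' :: text.toList) true 0).2 % 2 = 1 := Nat.odd_iff.mp ho
    simp [hA, hB.1, hB.2, hk]
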